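-- pv_equiv track=rewrite | github.com/abheeparekh/WumpusWorld_RL | WumpusWorld_RL/wumpus_kb.py | axiom_generator_at_most_one_wumpus
-- ===== SOURCE A (Python) =====
-- def wumpus_str(x, y):
--     "There is a Wumpus at <x>,<y>"
--     return 'W{0}_{1}'.format(x, y)
--
-- def axiom_generator_at_most_one_wumpus(xmin, xmax, ymin, ymax):
--     """
--     Assert that there is at at most one Wumpus.
--     xmin, xmax, ymin, ymax := the bounds of the environment.
--     """
--     chambers = []
--     # Iterate over all the possible valid (x, y) coordinates and
--     # store each chamber location in a list
--     for xvalue in range(xmin, xmax + 1):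
--         for yvalue in range(ymin, ymax + 1):
--             chambers.append((xvalue, yvalue))
--             #chambers.append(wumpus_str(xvalue, yvalue))
--
--     # A list to store axioms for each room where there can be atmost
--     # one Wumpus
--     axiom_list = []
--
--     for chamber in chambers:
--         notChambers = []
--         notWumpus = []
--         # Store the list of all other locations except 'chamber'
--         for otherChamber in chambers:
--             if otherChamber != chamber:
--                 notChambers.append(otherChamber)
--         # Assert that wumpus Wx_y does not exist using the '~' connective in each
--         # of the locations in 'notChambers'
--         for notChamber in notChambers:
--             notWumpus.append('~' + wumpus_str(notChamber[0], notChamber[1]))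
--         # If there is a Wumpus at 'chamber', then use implication to state that no other
--         # Wumpus can exist on other Wx_y locations. This is states by connective ~Wx_y of all
--         # other chambers using '&' connective.
--         axiom_list.append('({0} >> ({1}))'.format(wumpus_str(chamber[0], chamber[1]), ' & '.join(notWumpus)))
--     # Join all the axioms in the axiom_list using the '&' connective to assure Wumpus is
--     # only in one location
--     axiom_str = ' & '.join(axiom_list)
--     return axiom_str
-- ===== SOURCE B (Python) =====
-- def wumpus_str(x, y):
--     "There is a Wumpus at <x>,<y>"
--     return 'W{0}_{1}'.format(x, y)
--
-- def _prefix_joins(neg):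
--     """p[i] == ' & '.join(neg[:i]) for i in 0..len(neg), by one forward pass."""
--     p = ['']
--     cur = None
--     for m in neg:
--         cur = m if cur is None else cur + ' & ' + m
--         p.append(cur)
--     return p
--
-- def _suffix_joins(neg):
--     """s[i] == ' & '.join(neg[i:]) for i in 0..len(neg), by one backward pass."""
--     s = ['']
--     cur = None
--     for m in reversed(neg):
--         cur = m if cur is None else m + ' & ' + cur
--         s.append(cur)
--     s.reverse()
--     return s
--
-- def axiom_generator_at_most_one_wumpus(xmin, xmax, ymin, ymax):
--     """
--     Assert that there is at most one Wumpus.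
--     xmin, xmax, ymin, ymax := the bounds of the environment.
--     """
--     chambers = [(x, y) for x in range(xmin, xmax + 1)
--                        for y in range(ymin, ymax + 1)]
--     neg = ['~' + wumpus_str(x, y) for (x, y) in chambers]
--     n = len(chambers)
--     # Dynamic programming over joins: pref[i] = ' & '.join(neg[:i]),
--     # suf[i] = ' & '.join(neg[i:]); the "all others" conjunction for
--     # chamber i is then glued from two ready-made strings instead of
--     # being joined element by element for every pivot.
--     pref = _prefix_joins(neg)
--     suf = _suffix_joins(neg)
--     out = []
--     for i, (x, y) in enumerate(chambers):
--         if i == 0: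
--             others = suf[1]
--         elif i == n - 1:
--             others = pref[i]
--         else:
--             others = pref[i] + ' & ' + suf[i + 1]
--         out.append('({0} >> ({1}))'.format(wumpus_str(x, y), others))
--     return ' & '.join(out)
-- ===== Notes on version B (the rewrite author's own statement) =====
-- stated objective: alternative
-- what changed: A re-filters the whole chamber list and re-joins the negated literals from scratch for every pivot chamber; B precomputes prefix-join and suffix-join string tables (pref[i] = join of neg[:i], suf[i] = join of neg[i:]) in two linear passes and glues each pivot's 'all others' conjunction from at most two ready-made strings.
import Mathlib
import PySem

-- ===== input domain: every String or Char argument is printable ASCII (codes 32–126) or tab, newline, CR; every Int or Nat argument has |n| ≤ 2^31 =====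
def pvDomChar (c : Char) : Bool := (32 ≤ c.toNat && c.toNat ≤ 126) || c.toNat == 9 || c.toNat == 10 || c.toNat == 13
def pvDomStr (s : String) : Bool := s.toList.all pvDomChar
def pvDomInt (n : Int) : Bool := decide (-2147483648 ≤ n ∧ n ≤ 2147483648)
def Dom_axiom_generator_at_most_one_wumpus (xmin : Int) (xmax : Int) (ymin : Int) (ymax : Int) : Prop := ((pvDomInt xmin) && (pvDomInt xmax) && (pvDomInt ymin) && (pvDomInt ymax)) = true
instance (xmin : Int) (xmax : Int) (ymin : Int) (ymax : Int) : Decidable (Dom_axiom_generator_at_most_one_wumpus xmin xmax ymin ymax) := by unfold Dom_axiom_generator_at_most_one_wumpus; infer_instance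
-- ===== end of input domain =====

-- B replaces A's per-pivot re-filter + element-by-element join by two precomputed
-- prefix-join / suffix-join string tables glued per pivot (alternative decomposition).

-- ===== PORT A =====
def wumpusStr (x y : Int) : String :=
  "W" ++ PySem.Int.toStr x ++ "_" ++ PySem.Int.toStr y

def axiom_generator_at_most_one_wumpus (xmin : Int) (xmax : Int) (ymin : Int) (ymax : Int) : String :=
  let chambers : List (Int × Int) :=
    (PySem.List.pyRange xmin (xmax + 1) 1).foldl (fun acc xvalue =>
      (PySem.List.pyRange ymin (ymax + 1) 1).foldl (fun acc2 yvalue =>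
        acc2 ++ [(xvalue, yvalue)]) acc) []
  let axiom_list : List String :=
    chambers.foldl (fun acc chamber =>
      let notChambers : List (Int × Int) :=
        chambers.foldl (fun nc otherChamber =>
          if otherChamber ≠ chamber then nc ++ [otherChamber] else nc) []
      let notWumpus : List String :=
        notChambers.foldl (fun nw notChamber =>
          nw ++ ["~" ++ wumpusStr notChamber.1 notChamber.2]) []
      acc ++ ["(" ++ wumpusStr chamber.1 chamber.2 ++ " >> (" ++
              PySem.Str.join " & " notWumpus ++ "))"]) []
  PySem.Str.join " & " axiom_list

-- ===== PORT B =====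
-- _prefix_joins: forward pass; cell i holds ' & '.join(neg[:i]) (cur is None ↔ nothing consumed yet)
def prefGo (cur : String) : List String → List String
  | [] => [cur]
  | m :: t => cur :: prefGo (cur ++ " & " ++ m) t

def prefJoins : List String → List String
  | [] => [""]
  | m :: t => "" :: prefGo m t

-- _suffix_joins: backward pass; cell i holds ' & '.join(neg[i:])
def sufJoins : List String → List String
  | [] => [""]
  | [m] => [m, ""]
  | m :: m2 :: t => (m ++ " & " ++ (sufJoins (m2 :: t)).headD "") :: sufJoins (m2 :: t)

def axiom_generator_at_most_one_wumpus_alt (xmin : Int) (xmax : Int) (ymin : Int) (ymax : Int) : String :=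
  let chambers : List (Int × Int) :=
    (PySem.List.pyRange xmin (xmax + 1) 1).flatMap (fun x =>
      (PySem.List.pyRange ymin (ymax + 1) 1).map (fun y => (x, y)))
  let neg : List String := chambers.map (fun c => "~" ++ wumpusStr c.1 c.2)
  let n : Int := PySem.List.len chambers
  let pref : List String := prefJoins neg
  let suf : List String := sufJoins neg
  let out : List String :=
    (PySem.List.enumerate chambers 0).map (fun p =>
      let others : String :=
        if p.1 = 0 then PySem.List.pyGetD suf 1 ""              -- index always in range (n ≥ 1 inside the loop)
        else if p.1 = n - 1 then PySem.List.pyGetD pref p.1 ""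
        else PySem.List.pyGetD pref p.1 "" ++ " & " ++ PySem.List.pyGetD suf (p.1 + 1) ""
      "(" ++ wumpusStr p.2.1 p.2.2 ++ " >> (" ++ others ++ "))")
  PySem.Str.join " & " out

-- ===== PRECONDITION & SPEC =====
def Spec_axiom_generator_at_most_one_wumpus (xmin : Int) (xmax : Int) (ymin : Int) (ymax : Int) (out : String) : Prop := out = axiom_generator_at_most_one_wumpus_alt xmin xmax ymin ymax
instance (xmin : Int) (xmax : Int) (ymin : Int) (ymax : Int) (out : String) : Decidable (Spec_axiom_generator_at_most_one_wumpus xmin xmax ymin ymax out) := by unfold Spec_axiom_generator_at_most_one_wumpus; infer_instance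

-- ===== CLAIM (what is proved, stated in full; the proofs are below) =====
def Claim_equal_axiom_generator_at_most_one_wumpus : Prop := ∀ (xmin : Int) (xmax : Int) (ymin : Int) (ymax : Int), Dom_axiom_generator_at_most_one_wumpus xmin xmax ymin ymax → Spec_axiom_generator_at_most_one_wumpus xmin xmax ymin ymax (axiom_generator_at_most_one_wumpus xmin xmax ymin ymax)

-- ===== LEMMAS AND PROOFS =====

theorem jn_singleton (a : String) : PySem.Str.join " & " [a] = a := by
  simp [PySem.Str.join]

theorem jn_cons_ne (a : String) (l : List String) (h : l ≠ []) :
    PySem.Str.join " & " (a :: l) = a ++ " & " ++ PySem.Str.join " & " l := by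
  cases l with
  | nil => exact absurd rfl h
  | cons b t =>
    simp only [PySem.Str.join, List.map, PySem.Chars.join_cons_cons]
    rw [String.ofList_append, String.ofList_append, String.ofList_toList]
    rfl

theorem jn_append (A B : List String) (hA : A ≠ []) (hB : B ≠ []) :
    PySem.Str.join " & " (A ++ B) = PySem.Str.join " & " A ++ " & " ++ PySem.Str.join " & " B := by
  induction A with
  | nil => exact absurd rfl hA
  | cons a t ih =>
    cases t with
    | nil =>
      rw [List.singleton_append, jn_cons_ne a B hB, jn_singleton]
    | cons b t2 =>
      rw [List.cons_append, jn_cons_ne a ((b :: t2) ++ B) (by simp), ih (by simp),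
          jn_cons_ne a (b :: t2) (by simp)]
      simp [String.append_assoc]

theorem prefGo_getD (t : List String) (i : Nat) (cur : String) (hi : i ≤ t.length) :
    (prefGo cur t).getD i "" =
      if i = 0 then cur else cur ++ " & " ++ PySem.Str.join " & " (t.take i) := by
  induction t generalizing cur i with
  | nil =>
    have h0 : i = 0 := by simpa using hi
    subst h0
    simp [prefGo]
  | cons m t' ih =>
    cases i with
    | zero => simp [prefGo]
    | succ j =>
      have hj : j ≤ t'.length := by simpa using hi
      simp only [prefGo, List.getD_cons_succ]
      rw [ih j _ hj]
      cases j with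
      | zero => simp [jn_singleton]
      | succ j' =>
        have ht' : t' ≠ [] := by
          cases t' with
          | nil => simp at hj
          | cons _ _ => simp
        have htake : t'.take (j' + 1) ≠ [] := by
          simp [List.take_eq_nil_iff, ht']
        rw [if_neg (by omega), if_neg (by omega), List.take_succ_cons,
            jn_cons_ne m _ htake]
        simp [String.append_assoc]

theorem prefJoins_getD (L : List String) (i : Nat) (hi : i ≤ L.length) :
    (prefJoins L).getD i "" = PySem.Str.join " & " (L.take i) := by
  cases L with
  | nil =>
    have h0 : i = 0 := by simpa using hi
    subst h0
    simp [prefJoins, PySem.Str.join]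
  | cons m t =>
    cases i with
    | zero => simp [prefJoins, PySem.Str.join]
    | succ j =>
      have hj : j ≤ t.length := by simpa using hi
      simp only [prefJoins, List.getD_cons_succ]
      rw [prefGo_getD t j m hj]
      cases j with
      | zero => simp [jn_singleton]
      | succ j' =>
        have ht : t ≠ [] := by
          cases t with
          | nil => simp at hj
          | cons _ _ => simp
        have htake : t.take (j' + 1) ≠ [] := by
          simp [List.take_eq_nil_iff, ht]
        rw [if_neg (by omega), List.take_succ_cons, jn_cons_ne m _ htake]

theorem sufJoins_getD (L : List String) (i : Nat) (hi : i ≤ L.length) :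
    (sufJoins L).getD i "" = PySem.Str.join " & " (L.drop i) := by
  induction L generalizing i with
  | nil =>
    have h0 : i = 0 := by simpa using hi
    subst h0
    simp [sufJoins, PySem.Str.join]
  | cons m t ih =>
    cases t with
    | nil =>
      have h01 : i = 0 ∨ i = 1 := by
        simp only [List.length_cons, List.length_nil] at hi
        omega
      rcases h01 with h | h <;> subst h
      · simp [sufJoins, jn_singleton]
      · simp [sufJoins, PySem.Str.join]
    | cons m2 t2 =>
      cases i with
      | zero =>
        have h0 : (sufJoins (m2 :: t2)).headD "" = (sufJoins (m2 :: t2)).getD 0 "" := by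
          cases t2 <;> simp [sufJoins]
        simp only [sufJoins, List.getD_cons_zero, List.drop_zero]
        rw [h0, ih 0 (by omega), jn_cons_ne m (m2 :: t2) (by simp)]
        simp
      | succ j =>
        have hj : j ≤ (m2 :: t2).length := by simpa using hi
        simp only [sufJoins, List.getD_cons_succ, List.drop_succ_cons]
        exact ih j hj

-- In a duplicate-free list, filtering out the element at index k keeps exactly the rest.
theorem filter_ne_getElem_of_nodup {α : Type} [DecidableEq α] (L : List α) (hnd : L.Nodup)
    (k : Nat) (hk : k < L.length) :
    L.filter (fun x => x ≠ L[k]) = L.take k ++ L.drop (k + 1) := by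
  induction L generalizing k with
  | nil => simp at hk
  | cons a t ih =>
    rcases List.nodup_cons.mp hnd with ⟨ha, hndt⟩
    cases k with
    | zero =>
      simp only [List.getElem_cons_zero, List.take_zero, List.drop_succ_cons,
        List.drop_zero, List.nil_append, List.filter_cons]
      simp only [ne_eq, not_true_eq_false, decide_false]
      exact List.filter_eq_self.mpr (fun x hx => by
        simp only [decide_eq_true_eq]
        exact fun h => ha (h ▸ hx))
    | succ k =>
      have hk' : k < t.length := by simpa using hk
      have hne : a ≠ t[k] := fun h => ha (h ▸ t.getElem_mem hk')
      have ht := ih hndt k hk'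
      simp only [List.getElem_cons_succ, List.filter_cons, List.take_succ_cons,
        List.drop_succ_cons]
      simp only [ne_eq, hne, not_false_eq_true, decide_true, ite_true]
      simp only [List.cons_append]
      exact congrArg (a :: ·) ht

theorem chambers_nodup (xmin xmax ymin ymax : Int) :
    ((PySem.List.pyRange xmin (xmax + 1) 1).flatMap (fun x =>
      (PySem.List.pyRange ymin (ymax + 1) 1).map (fun y => (x, y)))).Nodup := by
  rw [List.nodup_flatMap]
  constructor
  · intro x _
    exact (PySem.List.nodup_pyRange_one ymin (ymax + 1)).map
      (fun y1 y2 h => (Prod.mk.injEq _ _ _ _).mp h |>.2)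
  · refine List.Pairwise.imp ?_ (PySem.List.nodup_pyRange_one xmin (xmax + 1))
    intro x1 x2 hne p hp1 hp2
    simp only [List.mem_map] at hp1 hp2
    obtain ⟨y1, _, rfl⟩ := hp1
    obtain ⟨y2, _, h⟩ := hp2
    exact hne ((Prod.mk.injEq _ _ _ _).mp h).1.symm

-- B's three-way glue at pivot k equals the join of "everything but entry k".
theorem others_eq (L : List String) (k : Nat) (hk : k < L.length) :
    (if (k : Int) = 0 then PySem.List.pyGetD (sufJoins L) 1 ""
     else if (k : Int) = (L.length : Int) - 1 then PySem.List.pyGetD (prefJoins L) (k : Int) ""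
     else PySem.List.pyGetD (prefJoins L) (k : Int) "" ++ " & " ++
          PySem.List.pyGetD (sufJoins L) ((k : Int) + 1) "") =
    PySem.Str.join " & " (L.take k ++ L.drop (k + 1)) := by
  have hsuf1 : PySem.List.pyGetD (sufJoins L) 1 "" = (sufJoins L).getD 1 "" := by
    have : (1 : Int) = ((1 : Nat) : Int) := by norm_num
    rw [this, PySem.List.pyGetD_natCast]
  have hpk : PySem.List.pyGetD (prefJoins L) (k : Int) "" = (prefJoins L).getD k "" :=
    PySem.List.pyGetD_natCast _ _ _
  have hsk : PySem.List.pyGetD (sufJoins L) ((k : Int) + 1) "" = (sufJoins L).getD (k + 1) "" := by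
    have : ((k : Int) + 1) = ((k + 1 : Nat) : Int) := by push_cast; ring
    rw [this, PySem.List.pyGetD_natCast]
  by_cases h0 : k = 0
  · subst h0
    simp only [Nat.cast_zero, if_true, hsuf1]
    rw [sufJoins_getD L 1 (by omega)]
    simp
  · have h0' : ¬ ((k : Int) = 0) := by omega
    by_cases hlast : k = L.length - 1
    · have hl : (k : Int) = (L.length : Int) - 1 := by omega
      rw [if_neg h0', if_pos hl, hpk, prefJoins_getD L k (by omega)]
      have hdrop : L.drop (k + 1) = [] := List.drop_eq_nil_of_le (by omega)
      rw [hdrop, List.append_nil]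
    · have hl : ¬ ((k : Int) = (L.length : Int) - 1) := by omega
      rw [if_neg h0', if_neg hl, hpk, hsk,
          prefJoins_getD L k (by omega), sufJoins_getD L (k + 1) (by omega)]
      have hA : L.take k ≠ [] := by
        have : L ≠ [] := by cases L <;> simp_all
        simp [List.take_eq_nil_iff, h0, this]
      have hB : L.drop (k + 1) ≠ [] := by
        simp only [ne_eq, List.drop_eq_nil_iff]
        omega
      rw [jn_append _ _ hA hB]

theorem axiom_lists_eq (C : List (Int × Int)) (hnd : C.Nodup) :
    C.map (fun chamber =>
      "(" ++ wumpusStr chamber.1 chamber.2 ++ " >> (" ++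
      PySem.Str.join " & " ((C.filter (fun x => x ≠ chamber)).map
        (fun c => "~" ++ wumpusStr c.1 c.2)) ++ "))") =
    (PySem.List.enumerate C 0).map (fun p =>
      "(" ++ wumpusStr p.2.1 p.2.2 ++ " >> (" ++
      (if p.1 = 0 then
        PySem.List.pyGetD (sufJoins (C.map (fun c => "~" ++ wumpusStr c.1 c.2))) 1 ""
       else if p.1 = PySem.List.len C - 1 then
        PySem.List.pyGetD (prefJoins (C.map (fun c => "~" ++ wumpusStr c.1 c.2))) p.1 ""
       else
        PySem.List.pyGetD (prefJoins (C.map (fun c => "~" ++ wumpusStr c.1 c.2))) p.1 "" ++ " & " ++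
        PySem.List.pyGetD (sufJoins (C.map (fun c => "~" ++ wumpusStr c.1 c.2))) (p.1 + 1) "") ++ "))") := by
  apply List.ext_getElem
  · simp [PySem.List.length_enumerate]
  · intro k h1 h2
    have hk : k < C.length := by simpa using h1
    rw [List.getElem_map, List.getElem_map, PySem.List.getElem_enumerate]
    simp only [zero_add]
    rw [filter_ne_getElem_of_nodup C hnd k hk]
    rw [List.map_append, List.map_take, List.map_drop]
    set N := C.map (fun c => "~" ++ wumpusStr c.1 c.2) with hN
    have hlen : N.length = C.length := by rw [hN, List.length_map]
    have hk' : k < N.length := by rw [hlen]; exact hk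
    have h := others_eq N k hk'
    simp only [PySem.List.len_eq, ← hN, ← hlen]
    rw [← h]

theorem axiom_generator_at_most_one_wumpus_eq (xmin xmax ymin ymax : Int) :
    axiom_generator_at_most_one_wumpus xmin xmax ymin ymax =
    axiom_generator_at_most_one_wumpus_alt xmin xmax ymin ymax := by
  unfold axiom_generator_at_most_one_wumpus axiom_generator_at_most_one_wumpus_alt
  simp only [PySem.List.foldl_append_singleton_eq_map, PySem.List.foldl_append_eq_flatMap,
    PySem.List.foldl_append_ite_eq_filter, List.nil_append]
  exact congrArg (PySem.Str.join " & ") (axiom_lists_eq _ (chambers_nodup xmin xmax ymin ymax))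

-- ===== VERDICT (by name: the statement is the Claim_ definition above) =====
theorem axiom_generator_at_most_one_wumpus_spec : Claim_equal_axiom_generator_at_most_one_wumpus := by
  intro xmin xmax ymin ymax _
  unfold Spec_axiom_generator_at_most_one_wumpus
  exact axiom_generator_at_most_one_wumpus_eq xmin xmax ymin ymax
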